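-- pv_equiv track=rewrite | github.com/flokrieger/Aloha-HE | Scripts/GenerateConstantsROM.py | rns_getLines
-- ===== SOURCE A (Python) =====
-- w = 24 # word size
--
-- def rns_getLines(moduli):
--   R = 2**(w*3)
--   lines = []
--
--   for q in moduli:
--     lines.append(hex((R*R)%q)[2:])
--     lines.append(hex((R*R*2**40)%q)[2:])
--     lines.append(hex((R*R*2**80)%q)[2:])
--     lines.append(hex((R*R*2**120)%q)[2:])
--
--   return lines
-- ===== SOURCE B (Python) =====
-- w = 24 # word size
--
-- def rns_getLines(moduli):
--   R = 2**(w*3)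
--   lines = []
--
--   for q in moduli:
--     base = (R*R) % q          # running reduced residue
--     for _ in range(4):
--       lines.append(hex(base)[2:])
--       base = (base * 2**40) % q   # next power derived from the previous residue
--
--   return lines
-- ===== Notes on version B (the rewrite author's own statement) =====
-- stated objective: alternative
-- what changed: B keeps one running residue per modulus, reduced after each step, and derives each of the four constants from the previous residue (base = base*2**40 % q) instead of reducing four independently built big products R*R*2**k % q.
import Mathlib
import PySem

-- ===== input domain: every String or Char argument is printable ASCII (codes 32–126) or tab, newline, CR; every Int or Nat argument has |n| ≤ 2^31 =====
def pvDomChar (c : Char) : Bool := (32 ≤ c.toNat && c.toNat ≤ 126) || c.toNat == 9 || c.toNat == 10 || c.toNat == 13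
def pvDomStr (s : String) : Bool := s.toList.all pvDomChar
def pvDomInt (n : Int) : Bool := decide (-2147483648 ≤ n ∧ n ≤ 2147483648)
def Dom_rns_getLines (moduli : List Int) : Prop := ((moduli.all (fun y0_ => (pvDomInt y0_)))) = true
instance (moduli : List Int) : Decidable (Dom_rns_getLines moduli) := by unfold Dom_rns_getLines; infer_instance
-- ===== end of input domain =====

-- B replaces A's four independently reduced big products R*R*2^k % q by one running
-- residue per modulus, reduced after every step (alternative decomposition; same cost class).

-- shared helper for Python's hex(n)[2:] (both Pythons format with hex); exact for every Int:
-- lowercase hex digits, and for n < 0 the slice keeps the 'x' of '-0x…'.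
def pvHexDigit (n : Nat) : Char :=
  if n < 10 then Char.ofNat (48 + n) else Char.ofNat (87 + n)

def pvHexNat (n : Nat) : List Char :=
  if h : n < 16 then [pvHexDigit n]
  else pvHexNat (n / 16) ++ [pvHexDigit (n % 16)]
decreasing_by exact Nat.div_lt_self (by omega) (by omega)

def pvHexSuffix (n : Int) : String :=
  if n < 0 then String.ofList ('x' :: pvHexNat (-n).toNat) else String.ofList (pvHexNat n.toNat)

-- ===== PORT A =====
def rns_getLines (moduli : List Int) : List String :=
  let R : Int := 2 ^ (24 * 3)
  moduli.foldl (fun lines q =>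
    ((((lines ++ [pvHexSuffix (PySem.Int.mod (R * R) q)])
      ++ [pvHexSuffix (PySem.Int.mod (R * R * 2 ^ 40) q)])
      ++ [pvHexSuffix (PySem.Int.mod (R * R * 2 ^ 80) q)])
      ++ [pvHexSuffix (PySem.Int.mod (R * R * 2 ^ 120) q)])) []

-- ===== PORT B =====
def rns_getLines_alt (moduli : List Int) : List String :=
  let R : Int := 2 ^ (24 * 3)
  moduli.foldl (fun lines q =>
    let base := PySem.Int.mod (R * R) q
    ((List.range 4).foldl
      (fun (st : List String × Int) _ =>
        (st.1 ++ [pvHexSuffix st.2], PySem.Int.mod (st.2 * 2 ^ 40) q))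
      (lines, base)).1) []

-- ===== PRECONDITION & SPEC =====
-- Pre_ excludes exactly the inputs containing a zero modulus, where both Pythons raise ZeroDivisionError.
def Pre_rns_getLines (moduli : List Int) : Prop := (0 : Int) ∉ moduli
instance (moduli : List Int) : Decidable (Pre_rns_getLines moduli) := by unfold Pre_rns_getLines; infer_instance
def pvWitness_rns_getLines : List Int := ([3, 12289])
def Spec_rns_getLines (moduli : List Int) (out : List String) : Prop := out = rns_getLines_alt moduli
instance (moduli : List Int) (out : List String) : Decidable (Spec_rns_getLines moduli out) := by unfold Spec_rns_getLines; infer_instance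

-- ===== CLAIM (what is proved, stated in full; the proofs are below) =====
def Claim_equal_rns_getLines : Prop := ∀ (moduli : List Int), Dom_rns_getLines moduli → Pre_rns_getLines moduli → Spec_rns_getLines moduli (rns_getLines moduli)

-- ===== LEMMAS AND PROOFS =====
theorem pv_fmod_emod (a b : Int) : (a.fmod b) % b = a % b := by
  conv_lhs => rw [Int.fmod_def]
  simp [Int.sub_emod]

theorem pv_fmod_congr (a a' : Int) (b : Int) (hb : b ≠ 0) (h : a % b = a' % b) :
    a.fmod b = a'.fmod b := by
  have h2 : (a.fmod b) % b = (a'.fmod b) % b := by rw [pv_fmod_emod, pv_fmod_emod, h]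
  have hd : b ∣ (a'.fmod b - a.fmod b) := Int.ModEq.dvd h2
  rcases lt_or_gt_of_ne hb with hneg | hpos
  · have b1 := PySem.Int.mod_neg_bounds (a := a) hneg
    have b2 := PySem.Int.mod_neg_bounds (a := a') hneg
    have : a'.fmod b - a.fmod b = 0 := by
      refine Int.eq_zero_of_abs_lt_dvd (Int.neg_dvd.mpr hd) ?_
      rw [abs_lt]
      constructor <;> simp [PySem.Int.mod] at b1 b2 <;> omega
    omega
  · have b1l := PySem.Int.mod_nonneg (a := a) hpos
    have b1h := PySem.Int.mod_lt (a := a) hpos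
    have b2l := PySem.Int.mod_nonneg (a := a') hpos
    have b2h := PySem.Int.mod_lt (a := a') hpos
    have : a'.fmod b - a.fmod b = 0 := by
      refine Int.eq_zero_of_abs_lt_dvd hd ?_
      rw [abs_lt]
      simp [PySem.Int.mod] at *
      omega
    omega

-- (a % q * c) % q = (a * c) % q for Python's % (divisor-sign mod), any q ≠ 0
theorem pv_mod_mul (a c q : Int) (hq : q ≠ 0) :
    PySem.Int.mod (PySem.Int.mod a q * c) q = PySem.Int.mod (a * c) q := by
  show ((a.fmod q) * c).fmod q = (a * c).fmod q
  apply pv_fmod_congr _ _ _ hq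
  rw [Int.mul_emod, pv_fmod_emod, ← Int.mul_emod]

-- one element of the fold: B's 4-step running-residue loop emits A's four strings
theorem pv_step (lines : List String) (q : Int) (hq : q ≠ 0) :
    ((List.range 4).foldl
      (fun (st : List String × Int) _ =>
        (st.1 ++ [pvHexSuffix st.2], PySem.Int.mod (st.2 * 2 ^ 40) q))
      (lines, PySem.Int.mod ((2 ^ (24 * 3) : Int) * 2 ^ (24 * 3)) q)).1 =
    ((((lines ++ [pvHexSuffix (PySem.Int.mod ((2 ^ (24 * 3) : Int) * 2 ^ (24 * 3)) q)])
      ++ [pvHexSuffix (PySem.Int.mod ((2 ^ (24 * 3) : Int) * 2 ^ (24 * 3) * 2 ^ 40) q)])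
      ++ [pvHexSuffix (PySem.Int.mod ((2 ^ (24 * 3) : Int) * 2 ^ (24 * 3) * 2 ^ 80) q)])
      ++ [pvHexSuffix (PySem.Int.mod ((2 ^ (24 * 3) : Int) * 2 ^ (24 * 3) * 2 ^ 120) q)]) := by
  have e1 := pv_mod_mul ((2 ^ (24 * 3) : Int) * 2 ^ (24 * 3)) (2 ^ 40) q hq
  have e2 := pv_mod_mul ((2 ^ (24 * 3) : Int) * 2 ^ (24 * 3) * 2 ^ 40) (2 ^ 40) q hq
  have e3 := pv_mod_mul ((2 ^ (24 * 3) : Int) * 2 ^ (24 * 3) * 2 ^ 80) (2 ^ 40) q hq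
  have a2 : (2 ^ (24 * 3) : Int) * 2 ^ (24 * 3) * 2 ^ 40 * 2 ^ 40 =
      (2 ^ (24 * 3) : Int) * 2 ^ (24 * 3) * 2 ^ 80 := by ring
  have a3 : (2 ^ (24 * 3) : Int) * 2 ^ (24 * 3) * 2 ^ 80 * 2 ^ 40 =
      (2 ^ (24 * 3) : Int) * 2 ^ (24 * 3) * 2 ^ 120 := by ring
  simp only [show List.range 4 = [0,1,2,3] from rfl, List.foldl_cons, List.foldl_nil]
  rw [e1, e2, a2, e3, a3]

-- ===== VERDICT (by name: the statement is the Claim_ definition above) =====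
theorem pv_main (moduli : List Int) (hpre : (0 : Int) ∉ moduli) :
    rns_getLines moduli = rns_getLines_alt moduli := by
  unfold rns_getLines rns_getLines_alt
  induction moduli using List.reverseRecOn with
  | nil => rfl
  | append_singleton xs q ih =>
    have hq : q ≠ 0 := fun h => hpre (by simp [h])
    have hxs : (0 : Int) ∉ xs := fun h => hpre (by simp [h])
    simp only [List.foldl_append, List.foldl_cons, List.foldl_nil]
    rw [ih hxs, pv_step _ q hq]

-- ===== VERDICT (by name: the statement is the Claim_ definition above) =====
theorem rns_getLines_spec : Claim_equal_rns_getLines := by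
  intro moduli _ hpre
  exact pv_main moduli hpre
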